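-- pv_equiv track=rewrite | github.com/hellscollect/mlb-analyzer-api | providers/statsapi_provider.py | _hitless_run_lengths
-- ===== SOURCE A (Python) =====
-- from typing import Any, Dict, List, Optional, Tuple
--
-- def _hitless_run_lengths(logs: List[Dict[str, Any]]) -> List[int]:
--     """
--     Identify lengths of all hitless runs across the season logs (oldest->newest).
--     Excludes games with 0 AB (DNP/pinch-run only).
--     """
--     runs: List[int] = []
--     cur = 0
--     for g in logs:
--         ab = g.get("atBats") or 0
--         hits = g.get("hits") or 0
--         if ab == 0:
--             # treat as neutral separator — end any current run
--             if cur > 0: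
--                 runs.append(cur)
--                 cur = 0
--             continue
--         if hits == 0:
--             cur += 1
--         else:
--             if cur > 0:
--                 runs.append(cur)
--                 cur = 0
--     if cur > 0:
--         runs.append(cur)
--     return runs
-- ===== SOURCE B (Python) =====
-- def _hitless_run_lengths(logs):
--     # Classify each game, then read off maximal blocks of 'hitless' labels by index spans.
--     labels = []
--     for g in logs:
--         ab = g.get("atBats") or 0
--         hits = g.get("hits") or 0
--         if ab == 0:
--             labels.append('sep')
--         elif hits == 0:
--             labels.append('hitless')
--         else:
--             labels.append('hit')
--     runs = []
--     i = 0
--     n = len(labels)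
--     while i < n:
--         if labels[i] == 'hitless':
--             j = i + 1
--             while j < n and labels[j] == 'hitless':
--                 j += 1
--             runs.append(j - i)
--             i = j
--         else:
--             i += 1
--     return runs
-- ===== Notes on version B (the rewrite author's own statement) =====
-- stated objective: alternative
-- what changed: Replaces the single stateful counter loop (running counter cur, flushed at separators/hits and once after the loop) by a two-phase decomposition: first label every game as sep/hitless/hit, then scan the label list and emit the length of each maximal hitless span directly, with no running counter and no post-loop flush.
import Mathlib
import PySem

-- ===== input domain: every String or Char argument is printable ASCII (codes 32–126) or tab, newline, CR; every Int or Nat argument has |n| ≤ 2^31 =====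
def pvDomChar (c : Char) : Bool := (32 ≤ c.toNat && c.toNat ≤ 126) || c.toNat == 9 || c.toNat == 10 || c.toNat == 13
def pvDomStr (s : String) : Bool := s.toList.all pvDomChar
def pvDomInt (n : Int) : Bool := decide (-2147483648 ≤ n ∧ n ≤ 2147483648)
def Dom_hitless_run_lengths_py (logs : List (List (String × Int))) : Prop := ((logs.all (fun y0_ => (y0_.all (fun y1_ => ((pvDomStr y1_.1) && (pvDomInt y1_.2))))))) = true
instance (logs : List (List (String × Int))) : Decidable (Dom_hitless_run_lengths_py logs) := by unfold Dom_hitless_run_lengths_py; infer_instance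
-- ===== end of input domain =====

-- B labels every game first and then emits the length of each maximal hitless span,
-- replacing A's running counter with a two-phase label-then-group scan; same cost, different decomposition.

-- ===== PORT A =====
-- g.get(k) or 0 : missing key -> None -> 0; a stored 0 is falsy -> 0; exact as getD 0 on Int values.
def pvGetOr0 (g : List (String × Int)) (k : String) : Int :=
  (PySem.Dict.get? (PySem.Dict.mk g) k).getD 0

-- the loop body of A (one iteration of 'for g in logs')
def pvBodyA (st : List Int × Int) (g : List (String × Int)) : List Int × Int :=
  let runs := st.1
  let cur := st.2
  let ab := pvGetOr0 g "atBats"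
  let hits := pvGetOr0 g "hits"
  if ab == 0 then
    (if cur > 0 then (runs ++ [cur], 0) else (runs, 0))
  else if hits == 0 then
    (runs, cur + 1)
  else
    (if cur > 0 then (runs ++ [cur], 0) else (runs, cur))

def hitless_run_lengths_py (logs : List (List (String × Int))) : List Int :=
  let st := logs.foldl pvBodyA ([], 0)
  if st.2 > 0 then st.1 ++ [st.2] else st.1

-- ===== PORT B =====
inductive PvLab | sep | hitless | hit
deriving DecidableEq, Repr

def pvLabelOf (g : List (String × Int)) : PvLab :=
  let ab := pvGetOr0 g "atBats"
  let hits := pvGetOr0 g "hits"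
  if ab == 0 then .sep else if hits == 0 then .hitless else .hit

-- the span walk of Source B: at a hitless label, take the whole maximal hitless block at once
def pvRunsOf : List PvLab → List Int
  | [] => []
  | l :: ls =>
    if l = PvLab.hitless then
      (1 + ((ls.takeWhile (· = PvLab.hitless)).length : Int)) ::
        pvRunsOf (ls.dropWhile (· = PvLab.hitless))
    else pvRunsOf ls
termination_by ls => ls.length
decreasing_by
  · simpa using Nat.lt_succ_of_le (List.length_dropWhile_le _ ls)
  · simp

def hitless_run_lengths_py_alt (logs : List (List (String × Int))) : List Int :=
  pvRunsOf (logs.map pvLabelOf)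

-- ===== PRECONDITION & SPEC =====
def Spec_hitless_run_lengths_py (logs : List (List (String × Int))) (out : List Int) : Prop := out = hitless_run_lengths_py_alt logs
instance (logs : List (List (String × Int))) (out : List Int) : Decidable (Spec_hitless_run_lengths_py logs out) := by unfold Spec_hitless_run_lengths_py; infer_instance

-- ===== CLAIM (what is proved, stated in full; the proofs are below) =====
def Claim_equal_hitless_run_lengths_py : Prop := ∀ (logs : List (List (String × Int))), Dom_hitless_run_lengths_py logs → Spec_hitless_run_lengths_py logs (hitless_run_lengths_py logs)

-- ===== LEMMAS AND PROOFS =====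

-- A's fold step, factored through the label
def pvStep (st : List Int × Int) (l : PvLab) : List Int × Int :=
  match l with
  | .sep => if st.2 > 0 then (st.1 ++ [st.2], 0) else (st.1, 0)
  | .hitless => (st.1, st.2 + 1)
  | .hit => if st.2 > 0 then (st.1 ++ [st.2], 0) else (st.1, st.2)

def pvFinish (st : List Int × Int) : List Int :=
  if st.2 > 0 then st.1 ++ [st.2] else st.1

-- the "pending run" characterisation of A's tail computation
def pvTail (cur : Int) : List PvLab → List Int
  | [] => if cur > 0 then [cur] else []
  | .sep :: ls => (if cur > 0 then [cur] else []) ++ pvTail 0 ls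
  | .hitless :: ls => pvTail (cur + 1) ls
  | .hit :: ls => (if cur > 0 then [cur] else []) ++ pvTail 0 ls

lemma pvStep_eq (st : List Int × Int) (g : List (String × Int)) :
    pvBodyA st g = pvStep st (pvLabelOf g) := by
  simp only [pvBodyA, pvLabelOf, pvStep]
  split_ifs <;> rfl

lemma pvFoldl_tail : ∀ (labs : List PvLab) (runs : List Int) (cur : Int), 0 ≤ cur →
    pvFinish (labs.foldl pvStep (runs, cur)) = runs ++ pvTail cur labs := by
  intro labs
  induction labs with
  | nil =>
      intro runs cur _
      simp only [List.foldl, pvFinish, pvTail]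
      split_ifs <;> simp
  | cons l ls ih =>
      intro runs cur hcur
      cases l with
      | sep =>
          simp only [List.foldl, pvStep, pvTail]
          split_ifs with h <;> simp [ih _ _ le_rfl, List.append_assoc]
      | hitless =>
          simp only [List.foldl, pvStep, pvTail]
          exact ih runs (cur + 1) (by omega)
      | hit =>
          simp only [List.foldl, pvStep, pvTail]
          split_ifs with h
          · simp [ih _ _ le_rfl, List.append_assoc]
          · have hz : cur = 0 := by omega
            subst hz
            simp [ih _ _ le_rfl]

lemma pvTail_runsOf : ∀ (ls : List PvLab) (cur : Int), 0 ≤ cur →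
    pvTail cur ls =
      if cur > 0 then
        (cur + ((ls.takeWhile (· = PvLab.hitless)).length : Int)) ::
          pvRunsOf (ls.dropWhile (· = PvLab.hitless))
      else pvRunsOf ls := by
  intro ls
  induction ls with
  | nil =>
      intro cur _
      simp only [pvTail, List.takeWhile_nil, List.dropWhile_nil, pvRunsOf]
      split_ifs <;> simp
  | cons l ls ih =>
      intro cur hcur
      cases l with
      | hitless =>
          have h1 : pvTail cur (PvLab.hitless :: ls) = pvTail (cur + 1) ls := rfl
          rw [h1, ih (cur + 1) (by omega)]
          have hpos : cur + 1 > 0 := by omega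
          simp only [hpos, if_pos]
          by_cases h : cur > 0
          · simp only [h, if_pos, List.takeWhile_cons, List.dropWhile_cons]
            simp
            ring
          · have hz : cur = 0 := by omega
            subst hz
            simp only [gt_iff_lt, lt_irrefl, if_neg, not_false_iff]
            rw [pvRunsOf]
            simp
      | sep =>
          have h1 : pvTail cur (PvLab.sep :: ls) =
              (if cur > 0 then [cur] else []) ++ pvTail 0 ls := rfl
          rw [h1, ih 0 le_rfl]
          simp only [gt_iff_lt, lt_irrefl, if_neg, not_false_iff]
          have h2 : pvRunsOf (PvLab.sep :: ls) = pvRunsOf ls := by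
            rw [pvRunsOf]; simp
          by_cases h : cur > 0
          · simp only [h, if_pos]
            simp [h2]
          · simp [h, h2]
      | hit =>
          have h1 : pvTail cur (PvLab.hit :: ls) =
              (if cur > 0 then [cur] else []) ++ pvTail 0 ls := rfl
          rw [h1, ih 0 le_rfl]
          simp only [gt_iff_lt, lt_irrefl, if_neg, not_false_iff]
          have h2 : pvRunsOf (PvLab.hit :: ls) = pvRunsOf ls := by
            rw [pvRunsOf]; simp
          by_cases h : cur > 0
          · simp only [h, if_pos]
            simp [h2]
          · simp [h, h2]

-- ===== VERDICT (by name: the statement is the Claim_ definition above) =====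
theorem hitless_run_lengths_py_spec : Claim_equal_hitless_run_lengths_py := by
  intro logs _
  show hitless_run_lengths_py logs = hitless_run_lengths_py_alt logs
  unfold hitless_run_lengths_py hitless_run_lengths_py_alt
  have hfold : logs.foldl pvBodyA ([], 0) = (logs.map pvLabelOf).foldl pvStep ([], 0) := by
    rw [List.foldl_map]
    apply PySem.List.foldl_congr_mem
    intro acc g _
    exact pvStep_eq acc g
  show pvFinish _ = _
  rw [hfold, pvFoldl_tail _ _ _ le_rfl, pvTail_runsOf _ 0 le_rfl]
  simp
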